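-- pv_equiv track=rewrite | github.com/97wfinney/fpl-data-repo | mini-league-report.py | calc_formation
-- ===== SOURCE A (Python) =====
-- def calc_formation(picks):
--     # element_type: 1 GKP, 2 DEF, 3 MID, 4 FWD
--     g = d = m = f = 0
--     for p in picks:
--         mult = p.get("multiplier", 0)
--         if mult > 0:
--             et = p.get("element_type")
--             if et == 1:
--                 g += 1
--             elif et == 2:
--                 d += 1
--             elif et == 3:
--                 m += 1
--             elif et == 4:
--                 f += 1
--     return g, d, m, f
-- ===== SOURCE B (Python) =====
-- def calc_formation(picks):
--     # recursive decomposition: each pick contributes an indicator vector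
--     # (w*(et==1), w*(et==2), w*(et==3), w*(et==4)) added component-wise
--     # to the formation of the rest of the list (no branch chain, no counters).
--     if not picks:
--         return (0, 0, 0, 0)
--     p = picks[0]
--     g, d, m, f = calc_formation(picks[1:])
--     w = 1 if p.get("multiplier", 0) > 0 else 0
--     et = p.get("element_type")
--     return (g + w * (et == 1), d + w * (et == 2), m + w * (et == 3), f + w * (et == 4))
-- ===== Notes on version B (the rewrite author's own statement) =====
-- stated objective: alternative
-- what changed: B replaces A's single imperative pass with four named counters and a four-way if/elif chain by a structural recursion that computes the formation of the tail and adds the head pick's indicator vector (w*(et==k) for k=1..4) component-wise, eliminating the branch chain and the mutable accumulators.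
import Mathlib
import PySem

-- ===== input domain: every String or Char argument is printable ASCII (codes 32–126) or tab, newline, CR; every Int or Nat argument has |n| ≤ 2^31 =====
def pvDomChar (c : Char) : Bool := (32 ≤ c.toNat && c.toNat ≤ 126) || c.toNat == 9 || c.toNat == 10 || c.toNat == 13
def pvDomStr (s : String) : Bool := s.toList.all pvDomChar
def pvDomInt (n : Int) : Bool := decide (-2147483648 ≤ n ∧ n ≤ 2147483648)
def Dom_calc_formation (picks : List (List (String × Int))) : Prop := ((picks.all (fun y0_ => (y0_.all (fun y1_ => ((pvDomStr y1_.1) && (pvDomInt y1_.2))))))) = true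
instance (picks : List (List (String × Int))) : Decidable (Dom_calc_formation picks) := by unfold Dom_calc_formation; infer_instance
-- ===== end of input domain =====

-- B replaces A's single pass with four counters and an if/elif chain by a structural
-- recursion adding each pick's indicator vector to the tail's result (objective: alternative).

-- ===== PORT A =====
def calc_formation (picks : List (List (String × Int))) : Int × Int × Int × Int :=
  picks.foldl (fun acc p =>
    let mult := (PySem.Dict.mk p).getD "multiplier" 0
    if mult > 0 then
      let et := (PySem.Dict.mk p).get? "element_type"
      if et = some 1 then (acc.1 + 1, acc.2.1, acc.2.2.1, acc.2.2.2)
      else if et = some 2 then (acc.1, acc.2.1 + 1, acc.2.2.1, acc.2.2.2)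
      else if et = some 3 then (acc.1, acc.2.1, acc.2.2.1 + 1, acc.2.2.2)
      else if et = some 4 then (acc.1, acc.2.1, acc.2.2.1, acc.2.2.2 + 1)
      else acc
    else acc) ((0, 0, 0, 0) : Int × Int × Int × Int)

-- ===== PORT B =====
def calc_formation_alt (picks : List (List (String × Int))) : Int × Int × Int × Int :=
  match picks with
  | [] => (0, 0, 0, 0)
  | p :: rest =>
    let r := calc_formation_alt rest
    let w : Int := if (PySem.Dict.mk p).getD "multiplier" 0 > 0 then 1 else 0
    let et := (PySem.Dict.mk p).get? "element_type"
    (r.1 + w * (if et = some 1 then 1 else 0),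
     r.2.1 + w * (if et = some 2 then 1 else 0),
     r.2.2.1 + w * (if et = some 3 then 1 else 0),
     r.2.2.2 + w * (if et = some 4 then 1 else 0))

-- ===== PRECONDITION & SPEC =====
def Spec_calc_formation (picks : List (List (String × Int))) (out : Int × Int × Int × Int) : Prop := out = calc_formation_alt picks
instance (picks : List (List (String × Int))) (out : Int × Int × Int × Int) : Decidable (Spec_calc_formation picks out) := by unfold Spec_calc_formation; infer_instance

-- ===== CLAIM (what is proved, stated in full; the proofs are below) =====
def Claim_equal_calc_formation : Prop := ∀ (picks : List (List (String × Int))), Dom_calc_formation picks → Spec_calc_formation picks (calc_formation picks)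

-- ===== LEMMAS AND PROOFS =====

theorem calc_formation_loop (picks : List (List (String × Int))) (a : Int × Int × Int × Int) :
    picks.foldl (fun acc p =>
      let mult := (PySem.Dict.mk p).getD "multiplier" 0
      if mult > 0 then
        let et := (PySem.Dict.mk p).get? "element_type"
        if et = some 1 then (acc.1 + 1, acc.2.1, acc.2.2.1, acc.2.2.2)
        else if et = some 2 then (acc.1, acc.2.1 + 1, acc.2.2.1, acc.2.2.2)
        else if et = some 3 then (acc.1, acc.2.1, acc.2.2.1 + 1, acc.2.2.2)
        else if et = some 4 then (acc.1, acc.2.1, acc.2.2.1, acc.2.2.2 + 1)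
        else acc
      else acc) a =
    (a.1 + (calc_formation_alt picks).1,
     a.2.1 + (calc_formation_alt picks).2.1,
     a.2.2.1 + (calc_formation_alt picks).2.2.1,
     a.2.2.2 + (calc_formation_alt picks).2.2.2) := by
  induction picks generalizing a with
  | nil => simp [calc_formation_alt]
  | cons p rest ih =>
    simp only [List.foldl_cons]
    rw [ih]
    by_cases hm : (PySem.Dict.mk p).getD "multiplier" 0 > 0
    · rcases hEt : (PySem.Dict.mk p).get? "element_type" with _ | et
      · simp [calc_formation_alt, hm, hEt]
      · by_cases h1 : et = 1
        · simp [calc_formation_alt, hm, hEt, h1]; ring_nf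
        · by_cases h2 : et = 2
          · simp [calc_formation_alt, hm, hEt, h1, h2]; ring_nf
          · by_cases h3 : et = 3
            · simp [calc_formation_alt, hm, hEt, h1, h2, h3]; ring_nf
            · by_cases h4 : et = 4
              · simp [calc_formation_alt, hm, hEt, h1, h2, h3, h4]; ring_nf
              · simp [calc_formation_alt, hm, hEt, h1, h2, h3, h4]
    · simp [calc_formation_alt, hm]

-- ===== VERDICT (by name: the statement is the Claim_ definition above) =====
theorem calc_formation_spec : Claim_equal_calc_formation := by
  intro picks _
  unfold Spec_calc_formation calc_formation
  rw [calc_formation_loop]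
  simp
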